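-- pv_equiv track=rewrite | github.com/Amelas22/local-ai | Clerk/src/ai_agents/bmad_framework/api_mapper.py | _infer_http_method
-- ===== SOURCE A (Python) =====
-- from enum import Enum
--
-- class HTTPMethod(str, Enum):
--     """Supported HTTP methods."""
--
--     GET = "GET"
--     POST = "POST"
--     PUT = "PUT"
--     DELETE = "DELETE"
--     PATCH = "PATCH"
--
-- def _infer_http_method(command: str) -> HTTPMethod:
--     """Infer HTTP method from command name."""
--     command_lower = command.lower()
--
--     # GET operations
--     if any(
--         command_lower.startswith(prefix)
--         for prefix in ["get", "list", "search", "find", "view", "show", "fetch"]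
--     ):
--         return HTTPMethod.GET
--
--     # DELETE operations
--     elif any(
--         command_lower.startswith(prefix)
--         for prefix in ["delete", "remove", "destroy"]
--     ):
--         return HTTPMethod.DELETE
--
--     # PUT operations
--     elif any(
--         command_lower.startswith(prefix)
--         for prefix in ["update", "edit", "modify", "change"]
--     ):
--         return HTTPMethod.PUT
--
--     # Default to POST
--     else:
--         return HTTPMethod.POST
-- ===== SOURCE B (Python) =====
-- from enum import Enum
--
-- class HTTPMethod(str, Enum):
--     GET = "GET"
--     POST = "POST"
--     PUT = "PUT"
--     DELETE = "DELETE"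
--     PATCH = "PATCH"
--
-- _TERMINAL = {
--     "get": HTTPMethod.GET, "list": HTTPMethod.GET, "search": HTTPMethod.GET,
--     "find": HTTPMethod.GET, "view": HTTPMethod.GET, "show": HTTPMethod.GET,
--     "fetch": HTTPMethod.GET,
--     "delete": HTTPMethod.DELETE, "remove": HTTPMethod.DELETE,
--     "destroy": HTTPMethod.DELETE,
--     "update": HTTPMethod.PUT, "edit": HTTPMethod.PUT, "modify": HTTPMethod.PUT,
--     "change": HTTPMethod.PUT,
-- }
-- # every proper non-empty prefix of a keyword: the "still alive" states of the scan
-- _LIVE = {p[:i] for p in _TERMINAL for i in range(1, len(p))}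
--
-- def _infer_http_method(command: str) -> HTTPMethod:
--     """Infer HTTP method by scanning the command one character at a time:
--     grow the consumed prefix, stop as soon as it is a full keyword (return its
--     method) or can no longer become one (return POST)."""
--     acc = ""
--     for ch in command.lower():
--         acc += ch
--         method = _TERMINAL.get(acc)
--         if method is not None:
--             return method
--         if acc not in _LIVE:
--             return HTTPMethod.POST
--     return HTTPMethod.POST
-- ===== Notes on version B (the rewrite author's own statement) =====
-- stated objective: alternative
-- what changed: Replaced the per-prefix startswith scans (any() over four keyword groups) by a character-at-a-time incremental scan of the command that grows the consumed prefix, looks it up in a keyword dict, and aborts to POST as soon as the prefix is no longer a prefix of any keyword.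
import Mathlib
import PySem

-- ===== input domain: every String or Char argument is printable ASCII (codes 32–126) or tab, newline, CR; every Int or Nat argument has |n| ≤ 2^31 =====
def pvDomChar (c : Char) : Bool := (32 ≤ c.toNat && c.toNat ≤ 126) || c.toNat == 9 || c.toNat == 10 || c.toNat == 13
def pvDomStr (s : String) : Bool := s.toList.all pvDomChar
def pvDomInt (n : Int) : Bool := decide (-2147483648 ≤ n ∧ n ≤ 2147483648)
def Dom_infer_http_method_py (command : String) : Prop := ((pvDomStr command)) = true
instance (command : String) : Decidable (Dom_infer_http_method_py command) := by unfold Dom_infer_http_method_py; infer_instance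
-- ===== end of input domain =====

-- B replaces A's per-prefix startswith scans by a character-at-a-time scan of the command that
-- looks the consumed prefix up in a keyword dict and aborts to POST once it can match no keyword
-- (objective: alternative; return value only, same cost on these short keywords).


-- ===== PORT A =====
def infer_http_method_py (command : String) : String :=
  let command_lower := PySem.Str.lower command
  if ["get", "list", "search", "find", "view", "show", "fetch"].any
       (fun prefix_ => PySem.Str.startswith command_lower prefix_) then "GET"
  else if ["delete", "remove", "destroy"].any
       (fun prefix_ => PySem.Str.startswith command_lower prefix_) then "DELETE"
  else if ["update", "edit", "modify", "change"].any
       (fun prefix_ => PySem.Str.startswith command_lower prefix_) then "PUT"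
  else "POST"

-- ===== PORT B =====
-- _TERMINAL: keyword -> method
def pvTerminal : PySem.Dict String String :=
  PySem.Dict.ofList
    [("get", "GET"), ("list", "GET"), ("search", "GET"), ("find", "GET"),
     ("view", "GET"), ("show", "GET"), ("fetch", "GET"),
     ("delete", "DELETE"), ("remove", "DELETE"), ("destroy", "DELETE"),
     ("update", "PUT"), ("edit", "PUT"), ("modify", "PUT"), ("change", "PUT")]

-- _LIVE = {p[:i] for p in _TERMINAL for i in range(1, len(p))}
def pvLive : PySem.Set String :=
  PySem.Set.ofList
    (pvTerminal.keys.flatMap (fun p =>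
      (PySem.List.pyRange 1 (PySem.Str.len p) 1).map
        (fun i => PySem.Str.slice p none (some i))))

-- the for-loop over the lowered command's characters, with acc the consumed prefix
def pvWalk (acc : String) : List Char → String
  | [] => "POST"
  | ch :: rest =>
    let acc' := acc.push ch
    match pvTerminal.get? acc' with
    | some method => method
    | none => if PySem.Set.contains pvLive acc' then pvWalk acc' rest else "POST"

def infer_http_method_py_alt (command : String) : String :=
  pvWalk "" (PySem.Str.lower command).toList

-- ===== PRECONDITION & SPEC =====
def Spec_infer_http_method_py (command : String) (out : String) : Prop := out = infer_http_method_py_alt command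
instance (command : String) (out : String) : Decidable (Spec_infer_http_method_py command out) := by unfold Spec_infer_http_method_py; infer_instance

-- ===== CLAIM (what is proved, stated in full; the proofs are below) =====
def Claim_equal_infer_http_method_py : Prop := ∀ (command : String), Dom_infer_http_method_py command → Spec_infer_http_method_py command (infer_http_method_py command)

-- ===== LEMMAS AND PROOFS =====

-- the common characterisation both programs are reduced to: the (unique) keyword that is a
-- prefix of the lowered command decides the method, POST if there is none
def pvRes (s : String) : String :=
  ((pvTerminal.items.find? (fun e => PySem.Str.startswith s e.1)).elim "POST" Prod.snd)

-- scanning a table segment whose entries all map to m is the same as an any() check on the prefixes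
theorem pv_find_map_append (pred : String → Bool) (ps : List String) (m : String)
    (rest : List (String × String)) :
    (((ps.map (fun p => (p, m)) ++ rest).find? (fun e => pred e.1)).elim "POST" Prod.snd)
      = if ps.any pred then m
        else ((rest.find? (fun e => pred e.1)).elim "POST" Prod.snd) := by
  induction ps with
  | nil => simp
  | cons p ps ih =>
    by_cases h : pred p
    · simp [h]
    · simp only [List.map_cons, List.cons_append, List.find?, h, List.any_cons,
        Bool.false_or]
      exact ih

-- A is exactly pvRes of the lowered command
theorem pv_A_eq (command : String) :
    infer_http_method_py command = pvRes (PySem.Str.lower command) := by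
  unfold infer_http_method_py pvRes
  have htab : pvTerminal.items
      = ["get", "list", "search", "find", "view", "show", "fetch"].map (fun p => (p, "GET"))
        ++ (["delete", "remove", "destroy"].map (fun p => (p, "DELETE"))
        ++ (["update", "edit", "modify", "change"].map (fun p => (p, "PUT")) ++ [])) := by rfl
  rw [htab, pv_find_map_append, pv_find_map_append, pv_find_map_append]
  simp [List.find?]

-- generic: find? of the unique satisfying element
theorem pv_find?_unique {α : Type} (p : α → Bool) (l : List α) (x : α)
    (hx : x ∈ l) (hpx : p x = true) (hu : ∀ y ∈ l, p y = true → y = x) :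
    l.find? p = some x := by
  induction l with
  | nil => cases hx
  | cons a l ih =>
    by_cases ha : p a = true
    · have hax : a = x := hu a (List.mem_cons_self) ha
      subst hax
      simp [List.find?, ha]
    · rcases List.mem_cons.mp hx with hx | hx
      · exact absurd (hx ▸ hpx) ha
      · simp only [List.find?]
        rw [Bool.not_eq_true] at ha
        rw [ha]
        exact ih hx (fun y hy => hu y (List.mem_cons_of_mem _ hy))

-- checked facts about the literal keyword table and live-prefix set
set_option maxRecDepth 8192 in
theorem pv_nokey : ∀ a ∈ ("" :: (pvLive : List String)),
    pvTerminal.items.all (fun e => !(PySem.Str.startswith a e.1)) = true := by decide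

theorem pv_keys_nonprefix : ∀ e ∈ pvTerminal.items, ∀ e' ∈ pvTerminal.items,
    PySem.Str.startswith e'.1 e.1 = true → e.1 = e'.1 := by decide

set_option maxRecDepth 8192 in
theorem pv_live_complete : ∀ e ∈ pvTerminal.items, ∀ i ∈ List.range e.1.toList.length,
    i = 0 ∨ String.ofList (e.1.toList.take i) ∈ (pvLive : List String) := by decide

theorem pv_keys_nodup : (pvTerminal.items.map Prod.fst).Nodup := by decide

-- injectivity of the key on table entries
theorem pv_entry_eq {a b : String × String} (ha : a ∈ pvTerminal.items)
    (hb : b ∈ pvTerminal.items) (h : a.1 = b.1) : a = b := by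
  have := List.inj_on_of_nodup_map pv_keys_nodup
  exact this ha hb h

-- at most one keyword is a prefix of any given string
theorem pv_match_unique {s : String} {e e' : String × String}
    (he : e ∈ pvTerminal.items) (he' : e' ∈ pvTerminal.items)
    (hp : e.1.toList <+: s.toList) (hp' : e'.1.toList <+: s.toList) : e = e' := by
  rcases Nat.le_total e.1.toList.length e'.1.toList.length with h | h
  · have hpre : e.1.toList <+: e'.1.toList := List.prefix_of_prefix_length_le hp hp' h
    exact pv_entry_eq he he' (pv_keys_nonprefix e he e' he'
      ((PySem.Chars.startswith_iff _ _).mpr hpre))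
  · have hpre : e'.1.toList <+: e.1.toList := List.prefix_of_prefix_length_le hp' hp h
    exact (pv_entry_eq he' he (pv_keys_nonprefix e' he' e he
      ((PySem.Chars.startswith_iff _ _).mpr hpre))).symm

-- string-level shift of one character from the tail into the accumulator
theorem pv_shift (acc : String) (c : Char) (l : List Char) :
    acc ++ String.ofList (c :: l) = acc.push c ++ String.ofList l := by
  apply String.toList_inj.mp
  simp

-- main loop invariant: from any live (or initial empty) accumulator, the walk computes
-- pvRes of the whole remaining string
theorem pv_walk_eq : ∀ (l : List Char) (acc : String),
    (acc = "" ∨ acc ∈ (pvLive : List String)) →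
    pvWalk acc l = pvRes (acc ++ String.ofList l) := by
  intro l
  induction l with
  | nil =>
    intro acc hacc
    have hmem : acc ∈ ("" :: (pvLive : List String)) := by
      rcases hacc with rfl | h
      · exact List.mem_cons_self
      · exact List.mem_cons_of_mem _ h
    have hall := pv_nokey acc hmem
    rw [List.all_eq_true] at hall
    unfold pvWalk pvRes
    rw [String.append_empty]
    rw [List.find?_eq_none.mpr (fun e he => by simpa using hall e he)]
    rfl
  | cons c rest ih =>
    intro acc hacc
    have hmem : acc ∈ ("" :: (pvLive : List String)) := by
      rcases hacc with rfl | h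
      · exact List.mem_cons_self
      · exact List.mem_cons_of_mem _ h
    unfold pvWalk
    cases hget : pvTerminal.get? (acc.push c) with
    | some m =>
      have hmemit : (acc.push c, m) ∈ pvTerminal.items :=
        PySem.Dict.mem_items_of_get?_eq_some _ hget
      have hpref : (acc.push c).toList <+: (acc ++ String.ofList (c :: rest)).toList := by
        simp
      have hfind : pvTerminal.items.find?
          (fun e => PySem.Str.startswith (acc ++ String.ofList (c :: rest)) e.1)
          = some (acc.push c, m) := by
        apply pv_find?_unique _ _ _ hmemit
        · simpa using (PySem.Chars.startswith_iff _ _).mpr hpref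
        · intro y hy hpy
          have hyp : y.1.toList <+: (acc ++ String.ofList (c :: rest)).toList := by
            have := (PySem.Chars.startswith_iff _ _).mp (by simpa using hpy)
            simpa using this
          exact pv_match_unique hy hmemit hyp hpref
      unfold pvRes
      rw [hfind]
      simp only [hget]
      rfl
    | none =>
      by_cases hc : PySem.Set.contains pvLive (acc.push c) = true
      · simp only [hget, hc, if_true]
        have hlive : acc.push c ∈ (pvLive : List String) :=
          (PySem.Set.contains_iff _ _).mp hc
        rw [ih (acc.push c) (Or.inr hlive), pv_shift]
      · simp only [Bool.not_eq_true] at hc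
        simp only [hget, hc, Bool.false_eq_true, if_false]
        -- no keyword is a prefix of the whole string: pvRes = POST
        unfold pvRes
        rw [List.find?_eq_none.mpr ?nopref]
        · rfl
        case nopref =>
          intro e he
          simp only [Bool.not_eq_true]
          by_contra hsw
          simp only [Bool.not_eq_false] at hsw
          have hpe : e.1.toList <+: (acc.push c).toList ++ rest := by
            have := (PySem.Chars.startswith_iff _ _).mp (by simpa using hsw)
            simpa using this
          have hnl : acc.push c ∉ (pvLive : List String) := by
            intro h
            have := (PySem.Set.contains_iff pvLive (acc.push c)).mpr h
            rw [hc] at this; cases this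
          rcases Nat.le_total e.1.toList.length (acc.push c).toList.length with hle | hge
          · -- key would be a prefix of acc.push c
            have hpre : e.1.toList <+: (acc.push c).toList :=
              List.prefix_of_prefix_length_le hpe (List.prefix_append _ _) hle
            rcases Nat.lt_or_ge e.1.toList.length (acc.push c).toList.length with hlt | hge2
            · -- strictly shorter: the keyword would be a prefix of acc, contradicting pv_nokey
              have htake : e.1.toList = (acc.push c).toList.take e.1.toList.length :=
                List.prefix_iff_eq_take.mp hpre
              have hlen : e.1.toList.length ≤ acc.toList.length := by
                simp only [String.toList_push, List.length_append, List.length_cons,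
                  List.length_nil] at hlt
                omega
              have hpacc : e.1.toList <+: acc.toList := by
                rw [List.prefix_iff_eq_take, htake]
                simp only [String.toList_push]
                rw [List.take_append_of_le_length hlen]
                rw [List.length_take, Nat.min_eq_left hlen]
              have hall := pv_nokey acc hmem
              rw [List.all_eq_true] at hall
              have hne := hall e he
              simp only [Bool.not_eq_eq_eq_not, Bool.not_true] at hne
              have hsw2 : PySem.Str.startswith acc e.1 = true := by
                simpa using (PySem.Chars.startswith_iff acc.toList e.1.toList).mpr hpacc
              rw [hsw2] at hne
              cases hne
            · -- equal length: e.1 = acc.push c, but get? returned none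
              have heq : e.1.toList = (acc.push c).toList := by
                have := List.prefix_iff_eq_take.mp hpre
                rw [this, List.take_of_length_le hge2]
              have heqs : e.1 = acc.push c := String.toList_inj.mp heq
              have hg := PySem.Dict.get?_of_mem_items pvTerminal he (by
                simpa [PySem.Dict.keys] using pv_keys_nodup)
              rw [heqs, hget] at hg
              cases hg
          · -- keyword strictly longer: acc.push c is a proper nonempty prefix of it → live
            have hpre : (acc.push c).toList <+: e.1.toList :=
              List.prefix_of_prefix_length_le (List.prefix_append _ _) hpe hge
            have htake : (acc.push c).toList = e.1.toList.take (acc.push c).toList.length :=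
              List.prefix_iff_eq_take.mp hpre
            rcases Nat.lt_or_ge (acc.push c).toList.length e.1.toList.length with hlt | hge2
            · have hi : (acc.push c).toList.length ∈ List.range e.1.toList.length :=
                List.mem_range.mpr hlt
              rcases pv_live_complete e he _ hi with h0 | hin
              · simp at h0
              · rw [← htake, String.ofList_toList] at hin
                exact hnl hin
            · -- lengths equal: e.1 = acc.push c, but get? returned none
              have heq : (acc.push c).toList = e.1.toList := by
                rw [htake, List.take_of_length_le hge2]
              have heqs : e.1 = acc.push c := String.toList_inj.mp heq.symm
              have hg := PySem.Dict.get?_of_mem_items pvTerminal he (by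
                simpa [PySem.Dict.keys] using pv_keys_nodup)
              rw [heqs, hget] at hg
              cases hg

-- ===== VERDICT (by name: the statement is the Claim_ definition above) =====
theorem infer_http_method_py_spec : Claim_equal_infer_http_method_py := by
  intro command _
  unfold Spec_infer_http_method_py infer_http_method_py_alt
  rw [pv_A_eq, pv_walk_eq (PySem.Str.lower command).toList "" (Or.inl rfl)]
  rw [String.ofList_toList, String.empty_append]
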